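-- pv_equiv track=rewrite | github.com/jaredkoontz/leetcode_py | 2126_destroying_asteroids/test_destroying_asteroids.py | asteroidsDestroyed_heap
-- ===== SOURCE A (Python) =====
-- import heapq
--
-- def asteroidsDestroyed_heap(mass: int, asteroids: list[int]) -> bool:
--     # Time: O(n)
--     # Space: O(1)
--     heapq.heapify(asteroids)
--     while asteroids:
--         candi = heapq.heappop(asteroids)
--         if candi > mass:
--             return False
--         else:
--             mass += candi
--     return True
-- ===== SOURCE B (Python) =====
-- def asteroidsDestroyed_heap(mass: int, asteroids: list[int]) -> bool:
--     for candi in sorted(asteroids):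
--         if candi > mass:
--             return False
--         mass += candi
--     return True
-- ===== Notes on version B (the rewrite author's own statement) =====
-- stated objective: idiomatic
-- what changed: Replaces heapify plus a repeated-heappop loop with one sorted() copy followed by a single linear scan (and B leaves the asteroids list unmutated, while A heapifies and drains it in place).
import Mathlib
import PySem

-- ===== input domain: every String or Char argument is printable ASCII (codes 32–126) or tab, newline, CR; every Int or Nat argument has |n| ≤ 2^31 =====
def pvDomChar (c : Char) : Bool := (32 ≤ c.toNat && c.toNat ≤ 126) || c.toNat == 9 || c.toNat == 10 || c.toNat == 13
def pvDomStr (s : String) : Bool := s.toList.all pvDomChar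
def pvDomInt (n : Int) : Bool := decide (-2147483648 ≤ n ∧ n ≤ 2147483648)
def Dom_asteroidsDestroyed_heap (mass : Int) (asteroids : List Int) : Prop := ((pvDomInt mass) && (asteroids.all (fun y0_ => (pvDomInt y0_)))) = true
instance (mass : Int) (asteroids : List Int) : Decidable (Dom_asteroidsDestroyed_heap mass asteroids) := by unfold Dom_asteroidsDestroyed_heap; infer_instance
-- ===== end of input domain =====

-- B replaces A's heapify + repeated-heappop loop with one sorted() copy followed by a single
-- linear scan (idiomatic; B also leaves the asteroids list unmutated, whereas A heapifies and
-- drains it in place — the equivalence proved here is about the RETURN value only).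
-- A's stdlib calls heapq.heapify/heappop are ported as a mergeable binary min-heap (a tree
-- priority queue; the Nat arguments below are fuel bounds that only make the recursions
-- structural — with the fuel the wrappers supply they are never exhausted); A's own while-loop
-- (pop the minimum, compare with mass, accumulate) is transliterated step for step on top of it.

-- ===== PORT A =====
inductive PQ : Type
  | leaf : PQ
  | node : Int → PQ → PQ → PQ
deriving DecidableEq, Repr

def PQ.size : PQ → Nat
  | .leaf => 0
  | .node _ l r => l.size + r.size + 1

-- skew-heap merge; fuel ≥ a.size + b.size suffices (the 0 case is unreachable then)
def PQ.mergeFuel : Nat → PQ → PQ → PQ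
  | _, .leaf, t => t
  | _, .node x l r, .leaf => .node x l r
  | 0, .node x l r, .node _ _ _ => .node x l r
  | n + 1, .node x l1 r1, .node y l2 r2 =>
    if x ≤ y then .node x (PQ.mergeFuel n r1 (.node y l2 r2)) l1
    else .node y (PQ.mergeFuel n r2 (.node x l1 r1)) l2

def PQ.merge (a b : PQ) : PQ := PQ.mergeFuel (a.size + b.size) a b

-- heapq.heapify(asteroids)
def pqHeapify (asteroids : List Int) : PQ :=
  asteroids.foldl (fun t v => PQ.merge t (.node v .leaf .leaf)) .leaf

-- while asteroids: candi = heapq.heappop(asteroids); if candi > mass: return False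
--                  else: mass += candi
-- return True            (fuel ≥ t.size suffices; heappop of the root merges its children)
def pqPopLoopFuel : Nat → Int → PQ → Bool
  | _, _, .leaf => true
  | 0, _, .node _ _ _ => true
  | n + 1, mass, .node candi l r =>
    if candi > mass then false else pqPopLoopFuel n (mass + candi) (PQ.merge l r)

def asteroidsDestroyed_heap (mass : Int) (asteroids : List Int) : Bool :=
  pqPopLoopFuel (pqHeapify asteroids).size mass (pqHeapify asteroids)

-- ===== PORT B =====
-- for candi in sorted(asteroids): if candi > mass: return False; mass += candi
-- return True
def scanLoop (mass : Int) : List Int → Bool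
  | [] => true
  | candi :: rest => if candi > mass then false else scanLoop (mass + candi) rest

def asteroidsDestroyed_heap_alt (mass : Int) (asteroids : List Int) : Bool :=
  scanLoop mass (PySem.List.sorted asteroids (fun x => x) false)

-- ===== PRECONDITION & SPEC =====
def Spec_asteroidsDestroyed_heap (mass : Int) (asteroids : List Int) (out : Bool) : Prop := out = asteroidsDestroyed_heap_alt mass asteroids
instance (mass : Int) (asteroids : List Int) (out : Bool) : Decidable (Spec_asteroidsDestroyed_heap mass asteroids out) := by unfold Spec_asteroidsDestroyed_heap; infer_instance

-- ===== CLAIM (what is proved, stated in full; the proofs are below) =====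
def Claim_equal_asteroidsDestroyed_heap : Prop := ∀ (mass : Int) (asteroids : List Int), Dom_asteroidsDestroyed_heap mass asteroids → Spec_asteroidsDestroyed_heap mass asteroids (asteroidsDestroyed_heap mass asteroids)

-- ===== LEMMAS AND PROOFS =====

def PQ.elems : PQ → List Int
  | .leaf => []
  | .node x l r => x :: (l.elems ++ r.elems)

def PQ.IsHeap : PQ → Prop
  | .leaf => True
  | .node x l r => (∀ y ∈ l.elems, x ≤ y) ∧ (∀ y ∈ r.elems, x ≤ y) ∧ l.IsHeap ∧ r.IsHeap

theorem PQ.size_mergeFuel (n : Nat) (a b : PQ) (h : a.size + b.size ≤ n) :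
    (PQ.mergeFuel n a b).size = a.size + b.size := by
  fun_induction PQ.mergeFuel n a b with
  | case1 n t => simp [PQ.size]
  | case2 n x l r => simp [PQ.size]
  | case3 x l r y l2 r2 => simp [PQ.size] at h
  | case4 n x l1 r1 y l2 r2 hle ih =>
    simp only [PQ.size] at h ⊢
    rw [ih (by simp [PQ.size]; omega)]
    simp [PQ.size]; omega
  | case5 n x l1 r1 y l2 r2 hle ih =>
    simp only [PQ.size] at h ⊢
    rw [ih (by simp [PQ.size]; omega)]
    simp [PQ.size]; omega

theorem PQ.elems_mergeFuel (n : Nat) (a b : PQ) (h : a.size + b.size ≤ n) :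
    (PQ.mergeFuel n a b).elems.Perm (a.elems ++ b.elems) := by
  fun_induction PQ.mergeFuel n a b with
  | case1 n t => simp [PQ.elems]
  | case2 n x l r => simp [PQ.elems]
  | case3 x l r y l2 r2 => simp [PQ.size] at h
  | case4 n x l1 r1 y l2 r2 hle ih =>
    have hih := ih (by simp [PQ.size] at h ⊢; omega)
    rw [List.perm_iff_count] at hih ⊢
    intro c
    have := hih c
    simp only [PQ.elems, List.count_append, List.count_cons] at this ⊢
    omega
  | case5 n x l1 r1 y l2 r2 hle ih =>
    have hih := ih (by simp [PQ.size] at h ⊢; omega)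
    rw [List.perm_iff_count] at hih ⊢
    intro c
    have := hih c
    simp only [PQ.elems, List.count_append, List.count_cons] at this ⊢
    omega

theorem PQ.elems_merge (a b : PQ) : (PQ.merge a b).elems.Perm (a.elems ++ b.elems) :=
  PQ.elems_mergeFuel _ a b le_rfl

theorem PQ.isHeap_mergeFuel (n : Nat) (a b : PQ) (h : a.size + b.size ≤ n)
    (ha : a.IsHeap) (hb : b.IsHeap) : (PQ.mergeFuel n a b).IsHeap := by
  fun_induction PQ.mergeFuel n a b with
  | case1 n t => exact hb
  | case2 n x l r => exact ha
  | case3 x l r y l2 r2 => simp [PQ.size] at h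
  | case4 n x l1 r1 y l2 r2 hle ih =>
    obtain ⟨hl1, hr1, hhl1, hhr1⟩ := ha
    obtain ⟨hl2, hr2, hhl2, hhr2⟩ := hb
    have hfuel : r1.size + (PQ.node y l2 r2).size ≤ n := by simp [PQ.size] at h ⊢; omega
    refine ⟨?_, hl1, ih hfuel hhr1 ⟨hl2, hr2, hhl2, hhr2⟩, hhl1⟩
    intro z hz
    have := ((PQ.elems_mergeFuel n r1 (PQ.node y l2 r2) hfuel).mem_iff.mp hz)
    simp only [PQ.elems, List.mem_append, List.mem_cons] at this
    rcases this with hz1 | rfl | hz2 | hz2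
    · exact hr1 z hz1
    · exact hle
    · exact le_trans hle (hl2 z hz2)
    · exact le_trans hle (hr2 z hz2)
  | case5 n x l1 r1 y l2 r2 hle ih =>
    obtain ⟨hl1, hr1, hhl1, hhr1⟩ := ha
    obtain ⟨hl2, hr2, hhl2, hhr2⟩ := hb
    have hyx : y ≤ x := by omega
    have hfuel : r2.size + (PQ.node x l1 r1).size ≤ n := by simp [PQ.size] at h ⊢; omega
    refine ⟨?_, hl2, ih hfuel hhr2 ⟨hl1, hr1, hhl1, hhr1⟩, hhl2⟩
    intro z hz
    have := ((PQ.elems_mergeFuel n r2 (PQ.node x l1 r1) hfuel).mem_iff.mp hz)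
    simp only [PQ.elems, List.mem_append, List.mem_cons] at this
    rcases this with hz1 | rfl | hz2 | hz2
    · exact hr2 z hz1
    · exact hyx
    · exact le_trans hyx (hl1 z hz2)
    · exact le_trans hyx (hr1 z hz2)

theorem PQ.isHeap_merge (a b : PQ) (ha : a.IsHeap) (hb : b.IsHeap) : (PQ.merge a b).IsHeap :=
  PQ.isHeap_mergeFuel _ a b le_rfl ha hb

theorem PQ.size_merge (a b : PQ) : (PQ.merge a b).size = a.size + b.size :=
  PQ.size_mergeFuel _ a b le_rfl

theorem pqHeapify_aux_isHeap (xs : List Int) (t : PQ) (ht : t.IsHeap) :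
    (xs.foldl (fun t v => PQ.merge t (.node v .leaf .leaf)) t).IsHeap := by
  induction xs generalizing t with
  | nil => exact ht
  | cons v rest ih =>
    exact ih _ (PQ.isHeap_merge _ _ ht (by simp [PQ.IsHeap, PQ.elems]))

theorem pqHeapify_isHeap (xs : List Int) : (pqHeapify xs).IsHeap :=
  pqHeapify_aux_isHeap xs .leaf trivial

theorem pqHeapify_aux_perm (xs : List Int) (t : PQ) :
    (xs.foldl (fun t v => PQ.merge t (.node v .leaf .leaf)) t).elems.Perm (t.elems ++ xs) := by
  induction xs generalizing t with
  | nil => simp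
  | cons v rest ih =>
    refine ((ih _).trans ?_)
    rw [List.perm_iff_count]
    intro c
    have := (PQ.elems_merge t (.node v .leaf .leaf)).count_eq c
    simp only [PQ.elems, List.count_append, List.count_cons, List.count_nil] at this ⊢
    omega

theorem pqHeapify_perm (xs : List Int) : (pqHeapify xs).elems.Perm xs := by
  simpa [PQ.elems] using pqHeapify_aux_perm xs .leaf

theorem sorted_node_elems (x : Int) (l r : PQ)
    (hx : ∀ y ∈ (PQ.node x l r).elems, x ≤ y) :
    PySem.List.sorted (PQ.node x l r).elems (fun x => x) false
      = x :: PySem.List.sorted (PQ.merge l r).elems (fun x => x) false := by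
  refine PySem.List.sorted_id_eq_of_perm_of_pairwise _ _ ?_ ?_
  · have h1 : (x :: PySem.List.sorted (PQ.merge l r).elems (fun x => x) false).Perm
        (x :: (PQ.merge l r).elems) := List.Perm.cons x (PySem.List.sorted_perm _ _ _)
    have h2 : (x :: (PQ.merge l r).elems).Perm (PQ.node x l r).elems := by
      rw [List.perm_iff_count]
      intro c
      have := (PQ.elems_merge l r).count_eq c
      simp only [PQ.elems, List.count_cons, List.count_append] at this ⊢
      omega
    exact h1.trans h2
  · rw [List.pairwise_cons]
    constructor
    · intro y hy
      refine hx y ?_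
      have := ((PySem.List.sorted_perm _ (fun x => x) false).trans (PQ.elems_merge l r)).mem_iff.mp hy
      simp only [PQ.elems, List.mem_cons, List.mem_append] at this ⊢
      tauto
    · exact PySem.List.sorted_pairwise _ _

theorem pqPopLoop_eq_scan (n : Nat) (mass : Int) (t : PQ) (hn : t.size ≤ n) (ht : t.IsHeap) :
    pqPopLoopFuel n mass t = scanLoop mass (PySem.List.sorted t.elems (fun x => x) false) := by
  fun_induction pqPopLoopFuel n mass t with
  | case1 n mass => simp [PQ.elems, PySem.List.sorted, scanLoop]
  | case2 mass candi l r => simp [PQ.size] at hn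
  | case3 n mass candi l r hgt =>
    obtain ⟨hl, hr, hhl, hhr⟩ := ht
    have hx : ∀ y ∈ (PQ.node candi l r).elems, candi ≤ y := by
      intro y hy
      simp only [PQ.elems, List.mem_cons, List.mem_append] at hy
      rcases hy with rfl | hy | hy
      · exact le_refl y
      · exact hl y hy
      · exact hr y hy
    rw [sorted_node_elems candi l r hx]
    simp [scanLoop, hgt]
  | case4 n mass candi l r hgt ih =>
    obtain ⟨hl, hr, hhl, hhr⟩ := ht
    have hx : ∀ y ∈ (PQ.node candi l r).elems, candi ≤ y := by
      intro y hy
      simp only [PQ.elems, List.mem_cons, List.mem_append] at hy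
      rcases hy with rfl | hy | hy
      · exact le_refl y
      · exact hl y hy
      · exact hr y hy
    have hfuel : (PQ.merge l r).size ≤ n := by
      rw [PQ.size_merge]; simp [PQ.size] at hn; omega
    rw [sorted_node_elems candi l r hx, ih hfuel (PQ.isHeap_merge l r hhl hhr)]
    simp [scanLoop, hgt]

-- ===== VERDICT (by name: the statement is the Claim_ definition above) =====
theorem asteroidsDestroyed_heap_spec : Claim_equal_asteroidsDestroyed_heap := by
  intro mass asteroids _
  unfold Spec_asteroidsDestroyed_heap asteroidsDestroyed_heap asteroidsDestroyed_heap_alt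
  rw [pqPopLoop_eq_scan _ mass _ le_rfl (pqHeapify_isHeap asteroids)]
  rw [PySem.List.sorted_eq_sorted_of_perm _ _ _ (fun a b h => h) (pqHeapify_perm asteroids)]
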